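-- pv_equiv track=rewrite | github.com/leshchenko1979/fast-mcp-telegram | src/tools/contacts.py | _matches_chat_type_from_dict
-- ===== SOURCE A (Python) =====
-- def _matches_chat_type_from_dict(entity_dict: dict, chat_type: str) -> bool:
--     """Check if entity dict matches chat_type filter."""
--     if not chat_type:
--         return True
--     chat_types = [ct.strip().lower() for ct in chat_type.split(",") if ct.strip()]
--     valid_types = {"private", "bot", "group", "channel"}
--     if any(ct not in valid_types for ct in chat_types):
--         return False
--     entity_type = entity_dict.get("type")
--     return entity_type in chat_types
-- ===== SOURCE B (Python) =====
-- _VALID_TYPES = {"private", "bot", "group", "channel"}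
--
--
-- def _matches_chat_type_from_dict(entity_dict: dict, chat_type: str) -> bool:
--     """Character-level tokenizer: one scan over chat_type, no split()."""
--     if not chat_type:
--         return True
--     target = entity_dict.get("type")
--     found = False
--     acc = []
--     for c in chat_type + ",":  # sentinel delimiter closes the last token
--         if c == ",":
--             tok = "".join(acc).strip().lower()
--             acc = []
--             if tok:
--                 if tok not in _VALID_TYPES:
--                     return False
--                 if tok == target:
--                     found = True
--         else:
--             acc.append(c)
--     return found
-- ===== Notes on version B (the rewrite author's own statement) =====
-- stated objective: alternative
-- what changed: A stages split(",") into a token list, a comprehension normalizing it, an any() validation scan and an `in` membership scan; B never calls split: it is a character-level tokenizer that scans chat_type once (with a "," sentinel), accumulates each raw token in a buffer and classifies it (skip/invalid/match) at each delimiter, returning False at the first invalid token.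
import Mathlib
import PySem

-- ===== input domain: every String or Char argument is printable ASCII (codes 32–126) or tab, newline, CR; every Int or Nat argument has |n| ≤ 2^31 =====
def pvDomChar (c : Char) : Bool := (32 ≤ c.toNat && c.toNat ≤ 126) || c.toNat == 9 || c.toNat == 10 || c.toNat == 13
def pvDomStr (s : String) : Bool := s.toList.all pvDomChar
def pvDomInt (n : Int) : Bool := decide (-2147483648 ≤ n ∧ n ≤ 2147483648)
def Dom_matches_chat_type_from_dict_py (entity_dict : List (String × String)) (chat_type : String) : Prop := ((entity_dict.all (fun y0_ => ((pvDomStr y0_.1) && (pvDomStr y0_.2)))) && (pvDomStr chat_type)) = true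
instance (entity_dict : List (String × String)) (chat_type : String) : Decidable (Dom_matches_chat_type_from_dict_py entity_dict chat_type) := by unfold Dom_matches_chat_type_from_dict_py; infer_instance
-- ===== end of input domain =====

-- B replaces A's split-based staged passes (token list, normalizing comprehension, any() validation
-- scan, membership scan) by a character-level tokenizer: one scan over chat_type with a "," sentinel,
-- classifying each buffered token at its delimiter; alternative decomposition, same cost.

-- ===== PORT A =====
def matches_chat_type_from_dict_py (entity_dict : List (String × String)) (chat_type : String) : Bool :=
  if chat_type = "" then true
  else
    let chat_types := (((PySem.Str.split? chat_type ",").getD []).filter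
        (fun ct => PySem.Str.strip ct != "")).map (fun ct => PySem.Str.lower (PySem.Str.strip ct))
    let valid_types : PySem.Set String := PySem.Set.ofList ["private", "bot", "group", "channel"]
    if chat_types.any (fun ct => !(PySem.Set.contains valid_types ct)) then false
    else
      match (PySem.Dict.mk entity_dict).get? "type" with
      | some t => chat_types.contains t
      | none => false

-- ===== PORT B =====
-- Source B's module constant _VALID_TYPES
def mctValid : PySem.Set String := PySem.Set.ofList ["private", "bot", "group", "channel"]

-- Source B's character loop: acc is the raw-token buffer, found the flag; a ',' closes a token
def mctScan (target : Option String) : List Char → List Char → Bool → Bool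
  | [], _acc, found => found
  | c :: rest, acc, found =>
      if c = ',' then
        let tok := PySem.Chars.lower (PySem.Chars.strip acc)
        if tok = [] then mctScan target rest [] found
        else if !(PySem.Set.contains mctValid (String.ofList tok)) then false
        else mctScan target rest [] (found || (target == some (String.ofList tok)))
      else mctScan target rest (acc ++ [c]) found

def matches_chat_type_from_dict_py_alt (entity_dict : List (String × String)) (chat_type : String) : Bool :=
  if chat_type = "" then true
  else
    mctScan ((PySem.Dict.mk entity_dict).get? "type") (chat_type.toList ++ [',']) [] false

-- ===== PRECONDITION & SPEC =====
def Spec_matches_chat_type_from_dict_py (entity_dict : List (String × String)) (chat_type : String) (out : Bool) : Prop := out = matches_chat_type_from_dict_py_alt entity_dict chat_type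
instance (entity_dict : List (String × String)) (chat_type : String) (out : Bool) : Decidable (Spec_matches_chat_type_from_dict_py entity_dict chat_type out) := by unfold Spec_matches_chat_type_from_dict_py; infer_instance

-- ===== CLAIM (what is proved, stated in full; the proofs are below) =====
def Claim_equal_matches_chat_type_from_dict_py : Prop := ∀ (entity_dict : List (String × String)) (chat_type : String), Dom_matches_chat_type_from_dict_py entity_dict chat_type → Spec_matches_chat_type_from_dict_py entity_dict chat_type (matches_chat_type_from_dict_py entity_dict chat_type)


def mctSc : List Char → List Char × List (List Char)
  | [] => ([], [])
  | c :: rest =>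
      if c = ',' then ([], (mctSc rest).1 :: (mctSc rest).2)
      else (c :: (mctSc rest).1, (mctSc rest).2)
def mctEval (valid : PySem.Set String) (target : Option String) : List (List Char) → Bool → Bool
  | [], found => found
  | t :: ts, found =>
      let n := PySem.Chars.lower (PySem.Chars.strip t)
      if n = [] then mctEval valid target ts found
      else if !(PySem.Set.contains valid (String.ofList n)) then false
      else mctEval valid target ts (found || (target == some (String.ofList n)))
lemma mctEval_cons (valid : PySem.Set String) (target : Option String) (t : List Char)
    (ts : List (List Char)) (found : Bool) :
    mctEval valid target (t :: ts) found =
      (if PySem.Chars.lower (PySem.Chars.strip t) = [] then mctEval valid target ts found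
       else if !(PySem.Set.contains valid (String.ofList (PySem.Chars.lower (PySem.Chars.strip t)))) then false
       else mctEval valid target ts
         (found || (target == some (String.ofList (PySem.Chars.lower (PySem.Chars.strip t)))))) := rfl
lemma mctSc_go (l : List Char) : ∀ fuel, l.length ≤ fuel → ∀ (cur : List Char) (acc : List (List Char)),
    PySem.Chars.splitOn.go [','] fuel l cur acc
      = acc.reverse ++ (cur.reverse ++ (mctSc l).1) :: (mctSc l).2 := by
  induction l with
  | nil =>
      intro fuel _ cur acc
      cases fuel <;> simp [PySem.Chars.splitOn.go, mctSc]
  | cons c rest ih =>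
      intro fuel hf cur acc
      cases fuel with
      | zero => simp at hf
      | succ f =>
          have hf' : rest.length ≤ f := by simpa using hf
          by_cases hc : c = ','
          · subst hc
            rw [show PySem.Chars.splitOn.go [','] (f + 1) (',' :: rest) cur acc
                  = PySem.Chars.splitOn.go [','] f rest [] (cur.reverse :: acc) by
                simp [PySem.Chars.splitOn.go, List.isPrefixOf]]
            rw [ih f hf' [] (cur.reverse :: acc)]
            simp [mctSc]
          · rw [show PySem.Chars.splitOn.go [','] (f + 1) (c :: rest) cur acc
                  = PySem.Chars.splitOn.go [','] f rest (c :: cur) acc by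
                simp [PySem.Chars.splitOn.go, List.isPrefixOf, Ne.symm hc]]
            rw [ih f hf' (c :: cur) acc]
            simp [mctSc, hc]

lemma mctSplitOn_comma (l : List Char) :
    PySem.Chars.splitOn l [','] = (mctSc l).1 :: (mctSc l).2 := by
  have := mctSc_go l (l.length + 1) (by omega) [] []
  simpa [PySem.Chars.splitOn] using this

-- proof-side judge of a token list (valid set abstracted so it stays an atom)
lemma mctScan_cons_comma (target : Option String) (cs acc : List Char) (found : Bool) :
    mctScan target (',' :: cs) acc found =
      (if PySem.Chars.lower (PySem.Chars.strip acc) = [] then mctScan target cs [] found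
       else if !(PySem.Set.contains mctValid (String.ofList (PySem.Chars.lower (PySem.Chars.strip acc)))) then false
       else mctScan target cs []
         (found || (target == some (String.ofList (PySem.Chars.lower (PySem.Chars.strip acc)))))) := rfl

lemma mctScan_cons_ne (target : Option String) (c : Char) (cs acc : List Char) (found : Bool)
    (h : c ≠ ',') : mctScan target (c :: cs) acc found = mctScan target cs (acc ++ [c]) found := by
  simp [mctScan, h]

-- B's scanner = the judge applied to the split tokens
lemma mctScan_eq_eval (target : Option String) (cs : List Char) : ∀ (acc : List Char) (found : Bool),
    mctScan target (cs ++ [',']) acc found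
      = mctEval mctValid target ((acc ++ (mctSc cs).1) :: (mctSc cs).2) found := by
  induction cs with
  | nil =>
      intro acc found
      have e1 : acc ++ (mctSc ([] : List Char)).1 = acc := by simp [mctSc]
      have e2 : (mctSc ([] : List Char)).2 = [] := by simp [mctSc]
      rw [e1, e2, List.nil_append, mctScan_cons_comma, mctEval_cons]
      split_ifs <;> rfl
  | cons c rest ih =>
      intro acc found
      by_cases hc : c = ','
      · subst hc
        have e1 : acc ++ (mctSc (',' :: rest)).1 = acc := by simp [mctSc]
        have e2 : (mctSc (',' :: rest)).2 = (mctSc rest).1 :: (mctSc rest).2 := by simp [mctSc]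
        rw [e1, e2, show (',' :: rest) ++ [','] = ',' :: (rest ++ [',']) from rfl,
          mctScan_cons_comma, mctEval_cons]
        by_cases h1 : PySem.Chars.lower (PySem.Chars.strip acc) = []
        · rw [if_pos h1, if_pos h1, ih [] found]
          simp only [List.nil_append]
        · rw [if_neg h1, if_neg h1]
          by_cases h2 : (!(PySem.Set.contains mctValid
              (String.ofList (PySem.Chars.lower (PySem.Chars.strip acc))))) = true
          · rw [if_pos h2, if_pos h2]
          · rw [if_neg h2, if_neg h2, ih [] _]
            simp only [List.nil_append]
      · have e1 : acc ++ (mctSc (c :: rest)).1 = (acc ++ [c]) ++ (mctSc rest).1 := by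
          simp [mctSc, hc]
        have e2 : (mctSc (c :: rest)).2 = (mctSc rest).2 := by simp [mctSc, hc]
        rw [e1, e2, ← ih (acc ++ [c]) found,
          show (c :: rest) ++ [','] = c :: (rest ++ [',']) from rfl, mctScan_cons_ne _ _ _ _ _ hc]

lemma mctLower_eq_nil_iff (x : List Char) : PySem.Chars.lower x = [] ↔ x = [] := by
  simp [PySem.Chars.lower]

-- closed form of the judge: A's two scans over the normalized tokens
lemma mctEval_spec (valid : PySem.Set String) (target : Option String) (ts : List (List Char)) :
    ∀ found, mctEval valid target ts found
      = (if (((ts.filter (fun t => !(PySem.Chars.strip t).isEmpty)).map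
              (fun t => PySem.Chars.lower (PySem.Chars.strip t))).any
                (fun n => !(PySem.Set.contains valid (String.ofList n)))) then false
         else found || (((ts.filter (fun t => !(PySem.Chars.strip t).isEmpty)).map
              (fun t => PySem.Chars.lower (PySem.Chars.strip t))).any
                (fun n => target == some (String.ofList n)))) := by
  induction ts with
  | nil => intro found; simp [mctEval]
  | cons t ts ih =>
      intro found
      rw [mctEval_cons, List.filter_cons]
      by_cases h : PySem.Chars.strip t = []
      · have hf : (!(PySem.Chars.strip t).isEmpty) = false := by simp [h]
        rw [hf]
        simp only [Bool.false_eq_true, if_false]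
        rw [if_pos (show PySem.Chars.lower (PySem.Chars.strip t) = [] by
          simp [mctLower_eq_nil_iff, h]), ih]
      · have hf : (!(PySem.Chars.strip t).isEmpty) = true := by simp [h]
        rw [hf]
        simp only [if_true, List.map_cons, List.any_cons]
        rw [if_neg (show ¬ PySem.Chars.lower (PySem.Chars.strip t) = [] by
          simp [mctLower_eq_nil_iff, h])]
        by_cases hv : PySem.Set.contains valid (String.ofList (PySem.Chars.lower (PySem.Chars.strip t))) = true
        · rw [if_neg (show ¬ (!(PySem.Set.contains valid
              (String.ofList (PySem.Chars.lower (PySem.Chars.strip t))))) = true by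
            rw [hv]; decide), ih, hv]
          simp only [Bool.not_true, Bool.false_or, Bool.or_assoc]
        · rw [if_pos (show (!(PySem.Set.contains valid
              (String.ofList (PySem.Chars.lower (PySem.Chars.strip t))))) = true by
            rw [eq_false_of_ne_true hv]; decide), eq_false_of_ne_true hv]
          simp

-- A's string-level normalization pipeline pushed down to the char level
lemma mctBridge_any (L : List String) (p : String → Bool) :
    ((L.filter (fun ct => PySem.Str.strip ct != "")).map
        (fun ct => PySem.Str.lower (PySem.Str.strip ct))).any p
      = (((L.map String.toList).filter (fun t => !(PySem.Chars.strip t).isEmpty)).map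
          (fun t => PySem.Chars.lower (PySem.Chars.strip t))).any (fun n => p (String.ofList n)) := by
  induction L with
  | nil => rfl
  | cons ct L ih =>
      simp only [List.map_cons, List.filter_cons]
      have hmk : String.ofList (PySem.Chars.lower (PySem.Chars.strip ct.toList))
          = PySem.Str.lower (PySem.Str.strip ct) := by
        apply String.toList_inj.mp
        simp [String.toList_ofList]
      by_cases h : PySem.Chars.strip ct.toList = []
      · have h1 : (PySem.Str.strip ct != "") = false := by
          have : PySem.Str.strip ct = "" := by
            apply String.toList_inj.mp; simp [h]
          simp [this]
        rw [h1, if_neg (by simp), if_neg (by simp [h]), ih]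
      · have h1 : (PySem.Str.strip ct != "") = true := by
          have : ¬ PySem.Str.strip ct = "" := by
            intro he
            exact h (by simpa using congrArg String.toList he)
          simp [this]
        rw [h1, if_pos (by simp), if_pos (by simp [h])]
        simp only [List.map_cons, List.any_cons, ih, hmk]

-- the split tokens of A, char-level, are exactly mctSc
lemma mctSplit_toList (s : String) :
    ((PySem.Str.split? s ",").getD []).map String.toList
      = (mctSc s.toList).1 :: (mctSc s.toList).2 := by
  have h := PySem.Str.split?_map s ","
  rw [show ("," : String).toList = [','] from rfl] at h
  rw [PySem.Chars.split?] at h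
  simp only [List.isEmpty_cons] at h
  cases hs : PySem.Str.split? s "," with
  | none => rw [hs] at h; simp at h
  | some L =>
      rw [hs] at h
      simp only [Option.map_some] at h
      have := Option.some.inj h
      simpa [mctSplitOn_comma] using this

-- ===== VERDICT (by name: the statement is the Claim_ definition above) =====
theorem matches_chat_type_from_dict_py_spec : Claim_equal_matches_chat_type_from_dict_py := by
  intro entity_dict chat_type _
  unfold Spec_matches_chat_type_from_dict_py matches_chat_type_from_dict_py matches_chat_type_from_dict_py_alt
  by_cases hct : chat_type = ""
  · simp [hct]
  · rw [if_neg hct, if_neg hct, mctScan_eq_eval, mctEval_spec]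
    simp only [List.nil_append, Bool.false_or, mctValid]
    rw [← mctSplit_toList chat_type]
    cases hget : (PySem.Dict.mk entity_dict).get? "type" with
    | none =>
        rw [mctBridge_any]
        simp
    | some t =>
        have hsome : ∀ x : String, (some t == some x) = (t == x) := fun _ => rfl
        rw [mctBridge_any]
        have hm : (match (some t : Option String) with
            | some x => ((((PySem.Str.split? chat_type ",").getD []).filter
                (fun ct => PySem.Str.strip ct != "")).map
                (fun ct => PySem.Str.lower (PySem.Str.strip ct))).contains x
            | none => false)
            = ((((PySem.Str.split? chat_type ",").getD []).filter
                (fun ct => PySem.Str.strip ct != "")).map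
                (fun ct => PySem.Str.lower (PySem.Str.strip ct))).contains t := rfl
        rw [hm, List.contains_eq_any_beq, mctBridge_any]
        simp [hsome]
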